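-- pv_equiv track=rewrite | github.com/shane-Coder/DailyCode | Optimal Array - GFG/optimal-array.py | optimalArray
-- ===== SOURCE A (Python) =====
-- from typing import List
--
-- def optimalArray(n : int, ar : List[int]) -> List[int]:
--     # code here
--     res = []
--     half, full = 0, 0
--     for i in range(n):
--         full += ar[i]
--         if i&1:
--             res.append(full - 2*half)
--         else:
--             half += ar[i//2]
--             res.append(full - 2*half + ar[i//2])
--     return res;
-- ===== SOURCE B (Python) =====
-- def optimalArray(n, ar):
--     # prefix-sum table, then direct random-access lookups (two passes)
--     pre = []
--     s = 0
--     for i in range(n):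
--         s += ar[i]
--         pre.append(s)
--     res = []
--     for i in range(n):
--         h = i // 2
--         if i % 2 == 1:
--             res.append(pre[i] - 2 * pre[h])
--         else:
--             res.append(pre[i] - pre[h] - (pre[h - 1] if h > 0 else 0))
--     return res
-- ===== Notes on version B (the rewrite author's own statement) =====
-- stated objective: alternative
-- what changed: Replaces A's single pass with incrementally maintained half/full accumulators by a two-pass scheme: build a prefix-sum table once, then compute each entry by direct random-access lookups pre[i], pre[i//2], pre[i//2-1].
-- outside the precondition, e.g. on optimalArray(3, [1, 2]): A raises IndexError, B raises IndexError
import Mathlib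
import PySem

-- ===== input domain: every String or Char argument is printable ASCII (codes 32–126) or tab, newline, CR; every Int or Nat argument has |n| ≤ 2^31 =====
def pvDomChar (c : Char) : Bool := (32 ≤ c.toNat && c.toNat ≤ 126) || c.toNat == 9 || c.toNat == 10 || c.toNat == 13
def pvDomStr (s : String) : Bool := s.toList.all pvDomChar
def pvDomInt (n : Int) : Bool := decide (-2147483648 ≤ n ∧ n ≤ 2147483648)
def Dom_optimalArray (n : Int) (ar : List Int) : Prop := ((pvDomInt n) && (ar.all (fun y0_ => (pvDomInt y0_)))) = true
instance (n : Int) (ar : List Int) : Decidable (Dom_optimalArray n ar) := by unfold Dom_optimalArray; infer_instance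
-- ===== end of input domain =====

-- B replaces A's incrementally maintained half/full accumulators by a precomputed
-- prefix-sum table indexed at i and i//2 in a second pass (alternative decomposition, same cost).

-- ===== PORT A =====
-- one pass; state (res, half, full); ar[i] / ar[i//2] via pyGetD (in range under Pre_)
def stepA (ar : List Int) (st : List Int × Int × Int) (i : Int) : List Int × Int × Int :=
  let res := st.1
  let half := st.2.1
  let full := st.2.2 + PySem.List.pyGetD ar i 0
  if PySem.Int.band i 1 ≠ 0 then
    (res ++ [full - 2 * half], half, full)
  else
    let half' := half + PySem.List.pyGetD ar (PySem.Int.floordiv i 2) 0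
    (res ++ [full - 2 * half' + PySem.List.pyGetD ar (PySem.Int.floordiv i 2) 0], half', full)

def optimalArray (n : Int) (ar : List Int) : List Int :=
  ((PySem.List.pyRange 0 n 1).foldl (stepA ar) ([], 0, 0)).1

-- ===== PORT B =====
-- pass 1: build the prefix-sum table `pre`; state (pre, s)
def stepPre (ar : List Int) (st : List Int × Int) (i : Int) : List Int × Int :=
  let s := st.2 + PySem.List.pyGetD ar i 0
  (st.1 ++ [s], s)

-- pass 2: each entry by random-access lookups into `pre`
def stepB (pre : List Int) (res : List Int) (i : Int) : List Int :=
  let h := PySem.Int.floordiv i 2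
  if PySem.Int.mod i 2 = 1 then
    res ++ [PySem.List.pyGetD pre i 0 - 2 * PySem.List.pyGetD pre h 0]
  else
    res ++ [PySem.List.pyGetD pre i 0 - PySem.List.pyGetD pre h 0 -
        (if h > 0 then PySem.List.pyGetD pre (h - 1) 0 else 0)]

def optimalArray_alt (n : Int) (ar : List Int) : List Int :=
  let pre := ((PySem.List.pyRange 0 n 1).foldl (stepPre ar) ([], 0)).1
  (PySem.List.pyRange 0 n 1).foldl (stepB pre) []

-- ===== PRECONDITION & SPEC =====
-- Pre_ excludes n > len(ar), where Python A (first out-of-range ar[i]) raises IndexError.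
def Pre_optimalArray (n : Int) (ar : List Int) : Prop := n ≤ (ar.length : Int)
instance (n : Int) (ar : List Int) : Decidable (Pre_optimalArray n ar) := by unfold Pre_optimalArray; infer_instance
def pvWitness_optimalArray : Int × List Int := (4, [3, -1, 4, 1])

def Spec_optimalArray (n : Int) (ar : List Int) (out : List Int) : Prop := out = optimalArray_alt n ar
instance (n : Int) (ar : List Int) (out : List Int) : Decidable (Spec_optimalArray n ar out) := by unfold Spec_optimalArray; infer_instance

-- ===== CLAIM (what is proved, stated in full; the proofs are below) =====
def Claim_equal_optimalArray : Prop := ∀ (n : Int) (ar : List Int), Dom_optimalArray n ar → Pre_optimalArray n ar → Spec_optimalArray n ar (optimalArray n ar)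

-- ===== LEMMAS AND PROOFS =====

-- prefix sums of ar (with default 0 past the end; within Pre_ only in-range cells are read)
def pfx (ar : List Int) : Nat → Int
  | 0 => 0
  | k + 1 => pfx ar k + ar.getD k 0

-- common closed form of entry i
def gfun (ar : List Int) (i : Nat) : Int :=
  if i % 2 = 1 then pfx ar (i + 1) - 2 * pfx ar (i / 2 + 1)
  else pfx ar (i + 1) - pfx ar (i / 2 + 1) - pfx ar (i / 2)

theorem foldA_range (ar : List Int) (m : Nat) :
    (PySem.List.pyRange 0 (m : Int) 1).foldl (stepA ar) ([], 0, 0) =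
      ((List.range m).map (gfun ar), pfx ar ((m + 1) / 2), pfx ar m) := by
  induction m with
  | zero => simp [PySem.List.pyRange_one_eq_nil, pfx]
  | succ m ih =>
    rw [show ((m + 1 : Nat) : Int) = (m : Int) + 1 by push_cast; ring,
        PySem.List.pyRange_one_succ_right (by positivity),
        List.foldl_append, ih]
    have hmod : PySem.Int.mod (m : Int) 2 = ((m % 2 : Nat) : Int) := by
      exact_mod_cast PySem.Int.mod_natCast m 2
    have hdiv : PySem.Int.floordiv (m : Int) 2 = ((m / 2 : Nat) : Int) := by
      exact_mod_cast PySem.Int.floordiv_natCast m 2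
    simp only [List.foldl_cons, List.foldl_nil, stepA, List.range_succ, List.map_append,
      List.map_cons, List.map_nil, PySem.Int.band_one, hmod, hdiv, PySem.List.pyGetD_natCast]
    rcases Nat.even_or_odd m with he | ho
    · have h2 : m % 2 = 0 := Nat.even_iff.mp he
      rw [if_neg (by simp [h2])]
      have hhalf : (m + 1) / 2 = m / 2 := by omega
      have hhalf2 : (m + 1 + 1) / 2 = m / 2 + 1 := by omega
      refine Prod.ext ?_ (Prod.ext ?_ ?_)
      · simp only [gfun, if_neg (show ¬ m % 2 = 1 by omega), hhalf]
        simp [pfx]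
        ring
      · simp [hhalf, hhalf2, pfx]
      · simp [pfx]
    · have h2 : m % 2 = 1 := Nat.odd_iff.mp ho
      rw [if_pos (by simp [h2])]
      have hhalf : (m + 1) / 2 = m / 2 + 1 := by omega
      have hhalf2 : (m + 1 + 1) / 2 = (m + 1) / 2 := by omega
      refine Prod.ext ?_ (Prod.ext ?_ ?_)
      · simp only [gfun, if_pos h2, hhalf]
        simp [pfx]
      · simp [hhalf2]
      · simp [pfx]

theorem foldPre_range (ar : List Int) (m : Nat) :
    (PySem.List.pyRange 0 (m : Int) 1).foldl (stepPre ar) ([], 0) =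
      ((List.range m).map (fun j => pfx ar (j + 1)), pfx ar m) := by
  induction m with
  | zero => simp [PySem.List.pyRange_one_eq_nil, pfx]
  | succ m ih =>
    rw [show ((m + 1 : Nat) : Int) = (m : Int) + 1 by push_cast; ring,
        PySem.List.pyRange_one_succ_right (by positivity),
        List.foldl_append, ih]
    simp [stepPre, List.range_succ, pfx]

theorem pre_lookup (ar : List Int) (M k : Nat) (hk : k < M) :
    PySem.List.pyGetD ((List.range M).map (fun j => pfx ar (j + 1))) (k : Int) 0 =
      pfx ar (k + 1) := by
  simp [List.getD_eq_getElem?_getD, hk]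

theorem foldB_range (ar : List Int) (M m : Nat) (hm : m ≤ M) :
    (PySem.List.pyRange 0 (m : Int) 1).foldl
        (stepB ((List.range M).map (fun j => pfx ar (j + 1)))) [] =
      (List.range m).map (gfun ar) := by
  induction m with
  | zero => simp [PySem.List.pyRange_one_eq_nil]
  | succ m ih =>
    rw [show ((m + 1 : Nat) : Int) = (m : Int) + 1 by push_cast; ring,
        PySem.List.pyRange_one_succ_right (by positivity),
        List.foldl_append, ih (by omega)]
    have hmod : PySem.Int.mod (m : Int) 2 = ((m % 2 : Nat) : Int) := by
      exact_mod_cast PySem.Int.mod_natCast m 2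
    have hdiv : PySem.Int.floordiv (m : Int) 2 = ((m / 2 : Nat) : Int) := by
      exact_mod_cast PySem.Int.floordiv_natCast m 2
    simp only [List.foldl_cons, List.foldl_nil, stepB, List.range_succ, List.map_append,
      List.map_cons, List.map_nil, hmod, hdiv]
    rw [pre_lookup ar M m (by omega), pre_lookup ar M (m / 2) (by omega)]
    rcases Nat.even_or_odd m with he | ho
    · have h2 : m % 2 = 0 := Nat.even_iff.mp he
      rw [if_neg (by simp [h2])]
      by_cases hz : m / 2 = 0
      · rw [if_neg (by simp [hz])]
        simp [gfun, show ¬ m % 2 = 1 by omega, hz, pfx]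
      · rw [if_pos (by exact_mod_cast Nat.pos_of_ne_zero hz),
            show ((m / 2 : Nat) : Int) - 1 = ((m / 2 - 1 : Nat) : Int) by omega,
            pre_lookup ar M (m / 2 - 1) (by omega)]
        simp [gfun, show ¬ m % 2 = 1 by omega, show m / 2 - 1 + 1 = m / 2 by omega]
    · have h2 : m % 2 = 1 := Nat.odd_iff.mp ho
      rw [if_pos (by simp [h2])]
      simp [gfun, h2, show m / 2 + 1 = (m + 1) / 2 by omega]

theorem both_eq (n : Int) (ar : List Int) : optimalArray n ar = optimalArray_alt n ar := by
  unfold optimalArray optimalArray_alt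
  rcases le_or_gt n 0 with h | h
  · rw [PySem.List.pyRange_one_eq_nil h]; rfl
  · obtain ⟨m, rfl⟩ : ∃ m : Nat, n = (m : Int) :=
      ⟨n.toNat, (Int.toNat_of_nonneg h.le).symm⟩
    rw [foldA_range, foldPre_range, foldB_range ar m m le_rfl]

-- ===== VERDICT (by name: the statement is the Claim_ definition above) =====
theorem optimalArray_spec : Claim_equal_optimalArray := by
  intro n ar _ _
  unfold Spec_optimalArray
  exact both_eq n ar
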